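-- pv_equiv track=rewrite | github.com/gpustack/gpustack | gpustack/utils/command.py | _mask_json_segments
-- ===== SOURCE A (Python) =====
-- def _mask_json_segments(text: str):
--     """
--     Replace JSON segments with placeholders before shlex.split.
--
--     This prevents shlex from incorrectly splitting JSON values that contain
--     spaces or special characters. For example:
--         --config={"key": "value with spaces"}
--     Without masking, shlex would split on the spaces inside the JSON.
--     """
--
--     result = []
--     mapping = {}
--
--     i = 0
--     n = len(text)
--     json_id = 0
--
--     while i < n:
--         # Look for pattern: '=' followed by JSON start ('{' or '[')
--         if text[i] == "=" and i + 1 < n and text[i + 1] in "{[":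
--             start = i + 1
--             j = start
--
--             # Track state for proper JSON parsing
--             depth = 0  # Bracket nesting level
--             in_string = False  # Whether we're inside a quoted string
--             escape = False  # Whether previous char was backslash
--
--             # Manually parse to find the matching closing bracket
--             while j < n:
--                 c = text[j]
--
--                 # Handle escape sequences (e.g., \" inside strings)
--                 if escape:
--                     escape = False
--                 elif c == "\\":
--                     escape = True
--                 # Toggle string state on unescaped quotes
--                 elif c == '"':
--                     in_string = not in_string
--                 # Only count brackets outside of strings
--                 elif not in_string:
--                     if c in "{[":
--                         depth += 1
--                     elif c in "}]":
--                         depth -= 1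
--                         # Found matching closing bracket
--                         if depth == 0:
--                             j += 1
--                             break
--
--                 j += 1
--
--             # Extract the JSON segment
--             json_text = text[start:j]
--
--             # Create a unique placeholder
--             placeholder = f"__JSON_{json_id}__"
--             json_id += 1
--
--             # Store mapping for later restoration
--             mapping[placeholder] = json_text
--
--             # Replace JSON with placeholder in result
--             result.append("=" + placeholder)
--             i = j
--             continue
--
--         # Copy non-JSON characters as-is
--         result.append(text[i])
--         i += 1
--
--     return "".join(result), mapping
-- ===== SOURCE B (Python) =====
-- def _mask_json_segments(text: str):
--     """Flat single-pass state machine: scanning vs in-JSON mode over one loop."""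
--     result = []
--     mapping = {}
--     json_id = 0
--     in_json = False
--     depth = 0
--     in_string = False
--     escape = False
--     buf = []
--     n = len(text)
--     for idx, c in enumerate(text):
--         if not in_json:
--             if c == "=" and idx + 1 < n and text[idx + 1] in "{[":
--                 in_json = True
--                 depth = 0
--                 in_string = False
--                 escape = False
--                 buf = []
--             else:
--                 result.append(c)
--         else:
--             buf.append(c)
--             if escape:
--                 escape = False
--             elif c == "\\":
--                 escape = True
--             elif c == '"':
--                 in_string = not in_string
--             elif not in_string:
--                 if c in "{[":
--                     depth += 1
--                 elif c in "}]":
--                     depth -= 1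
--                     if depth == 0:
--                         placeholder = f"__JSON_{json_id}__"
--                         json_id += 1
--                         mapping[placeholder] = "".join(buf)
--                         result.append("=" + placeholder)
--                         in_json = False
--     if in_json:
--         placeholder = f"__JSON_{json_id}__"
--         mapping[placeholder] = "".join(buf)
--         result.append("=" + placeholder)
--     return "".join(result), mapping
-- ===== Notes on version B (the rewrite author's own statement) =====
-- stated objective: alternative
-- what changed: Replaced A's nested loop (outer index scan with an inner JSON-bracket parser that resumes the outer index) by one flat single-pass state machine with an explicit scanning/in-JSON mode flag and top-level depth/in_string/escape state plus a buffer, flushed when depth returns to 0 or at end of input.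
import Mathlib
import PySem

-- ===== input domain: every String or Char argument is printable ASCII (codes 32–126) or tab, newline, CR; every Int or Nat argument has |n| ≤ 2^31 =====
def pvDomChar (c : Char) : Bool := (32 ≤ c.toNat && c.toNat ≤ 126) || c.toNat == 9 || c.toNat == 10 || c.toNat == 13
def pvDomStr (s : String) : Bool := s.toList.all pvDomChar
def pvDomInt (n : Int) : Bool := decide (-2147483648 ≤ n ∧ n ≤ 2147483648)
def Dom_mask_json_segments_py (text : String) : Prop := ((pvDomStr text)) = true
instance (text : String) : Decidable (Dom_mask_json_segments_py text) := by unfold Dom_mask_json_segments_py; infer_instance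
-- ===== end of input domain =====

-- B is a single flat state-machine loop (scanning vs in-JSON mode) instead of A's nested
-- loop-with-resume; same O(n) cost, objective: alternative decomposition.


-- ===== PORT A =====
-- f"__JSON_{json_id}__"
def pvPlaceholderA (jid : Int) : String := "__JSON_" ++ PySem.Int.toStr jid ++ "__"
-- inner while loop of A: consumes chars from position `start`, returning
-- (text[start:j], rest after j); state depth / in_string / escape as in A.
def pvAInner : List Char → Int → Bool → Bool → (List Char × List Char)
  | [], _, _, _ => ([], [])
  | c :: rest, depth, in_string, escape =>
    if escape then
      let (seg, r) := pvAInner rest depth in_string false; (c :: seg, r)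
    else if c = '\\' then
      let (seg, r) := pvAInner rest depth in_string true; (c :: seg, r)
    else if c = '"' then
      let (seg, r) := pvAInner rest depth (!in_string) escape; (c :: seg, r)
    else if !in_string then
      if c = '{' ∨ c = '[' then
        let (seg, r) := pvAInner rest (depth + 1) in_string escape; (c :: seg, r)
      else if c = '}' ∨ c = ']' then
        if depth - 1 = 0 then ([c], rest)   -- j += 1; break
        else
          let (seg, r) := pvAInner rest (depth - 1) in_string escape; (c :: seg, r)
      else
        let (seg, r) := pvAInner rest depth in_string escape; (c :: seg, r)
    else
      let (seg, r) := pvAInner rest depth in_string escape; (c :: seg, r)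

-- the rest after the inner loop is a suffix (needed for termination of the outer loop)
theorem pvAInner_snd_length (cs : List Char) : ∀ (d : Int) (i e : Bool),
    (pvAInner cs d i e).2.length ≤ cs.length := by
  induction cs with
  | nil => intro d i e; simp [pvAInner]
  | cons c rest ih =>
    intro d i e
    simp only [pvAInner]
    split_ifs <;> simp <;>
      exact le_trans (ih _ _ _) (Nat.le_succ _)

-- outer while loop of A
def pvAMain : List Char → Int → (List Char × List (String × String))
  | [], _ => ([], [])
  | c :: rest, jid =>
    if c = '=' ∧ (rest.head? = some '{' ∨ rest.head? = some '[') then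
      let seg := (pvAInner rest 0 false false).1
      let r := (pvAInner rest 0 false false).2
      let ph := pvPlaceholderA jid
      let (out, m) := pvAMain r (jid + 1)
      ('=' :: ph.toList ++ out, (ph, String.mk seg) :: m)
    else
      let (out, m) := pvAMain rest jid
      (c :: out, m)
termination_by cs _ => cs.length
decreasing_by
  all_goals simp
  exact pvAInner_snd_length _ _ _ _

def mask_json_segments_py (text : String) : String × (List (String × String)) :=
  let (out, m) := pvAMain text.toList 0
  (String.mk out, m)

-- ===== PORT B =====
-- f"__JSON_{json_id}__"
def pvPlaceholderB (jid : Int) : String := "__JSON_" ++ PySem.Int.toStr jid ++ "__"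
-- single flat loop; st = none: scanning mode, st = some (depth, in_string, escape, buf):
-- in-JSON mode; result/mapping carried as accumulators (the Python appends in place).
def pvBLoop : List Char → Option (Int × Bool × Bool × List Char) → Int →
    List Char → List (String × String) → (List Char × List (String × String))
  | [], none, _, acc, map => (acc, map)
  | [], some (_, _, _, buf), jid, acc, map =>       -- final `if in_json:` flush
    let ph := pvPlaceholderB jid
    (acc ++ '=' :: ph.toList, map ++ [(ph, String.mk buf)])
  | c :: rest, none, jid, acc, map =>
    if c = '=' ∧ (rest.head? = some '{' ∨ rest.head? = some '[') then
      pvBLoop rest (some (0, false, false, [])) jid acc map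
    else
      pvBLoop rest none jid (acc ++ [c]) map
  | c :: rest, some (depth, in_string, escape, buf), jid, acc, map =>
    let buf' := buf ++ [c]
    if escape then pvBLoop rest (some (depth, in_string, false, buf')) jid acc map
    else if c = '\\' then pvBLoop rest (some (depth, in_string, true, buf')) jid acc map
    else if c = '"' then pvBLoop rest (some (depth, !in_string, escape, buf')) jid acc map
    else if !in_string ∧ (c = '{' ∨ c = '[') then
      pvBLoop rest (some (depth + 1, in_string, escape, buf')) jid acc map
    else if !in_string ∧ (c = '}' ∨ c = ']') then
      if depth - 1 = 0 then
        let ph := pvPlaceholderB jid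
        pvBLoop rest none (jid + 1) (acc ++ '=' :: ph.toList) (map ++ [(ph, String.mk buf')])
      else pvBLoop rest (some (depth - 1, in_string, escape, buf')) jid acc map
    else pvBLoop rest (some (depth, in_string, escape, buf')) jid acc map

def mask_json_segments_py_alt (text : String) : String × (List (String × String)) :=
  let (out, m) := pvBLoop text.toList none 0 [] []
  (String.mk out, m)

-- ===== PRECONDITION & SPEC =====
def Spec_mask_json_segments_py (text : String) (out : String × (List (String × String))) : Prop := out = mask_json_segments_py_alt text
instance (text : String) (out : String × (List (String × String))) : Decidable (Spec_mask_json_segments_py text out) := by unfold Spec_mask_json_segments_py; infer_instance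

-- ===== CLAIM (what is proved, stated in full; the proofs are below) =====
def Claim_equal_mask_json_segments_py : Prop := ∀ (text : String), Dom_mask_json_segments_py text → Spec_mask_json_segments_py text (mask_json_segments_py text)

-- ===== LEMMAS AND PROOFS =====

-- B in JSON mode runs exactly A's inner loop, then flushes the placeholder and
-- returns to scanning mode on the rest.
theorem pvBLoop_some (cs : List Char) (d : Int) (i e : Bool) (buf : List Char)
    (jid : Int) (acc : List Char) (map : List (String × String)) :
    pvBLoop cs (some (d, i, e, buf)) jid acc map =
      pvBLoop (pvAInner cs d i e).2 none (jid + 1)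
        (acc ++ '=' :: (pvPlaceholderB jid).toList)
        (map ++ [(pvPlaceholderB jid, String.mk (buf ++ (pvAInner cs d i e).1))]) := by
  induction cs generalizing d i e buf jid acc map with
  | nil => simp [pvBLoop, pvAInner]
  | cons c rest ih =>
    simp only [pvBLoop, pvAInner]
    split_ifs <;>
      first
        | (exfalso; tauto)
        | (rw [ih]; simp [List.append_assoc])
        | simp

theorem pvPlaceholder_eq (jid : Int) : pvPlaceholderB jid = pvPlaceholderA jid := rfl

-- B in scanning mode computes A's outer loop appended to the accumulators.
theorem pvBLoop_none (n : Nat) : ∀ (cs : List Char), cs.length ≤ n →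
    ∀ (jid : Int) (acc : List Char) (map : List (String × String)),
    pvBLoop cs none jid acc map =
      (acc ++ (pvAMain cs jid).1, map ++ (pvAMain cs jid).2) := by
  induction n with
  | zero =>
    intro cs h jid acc map
    have : cs = [] := List.eq_nil_of_length_eq_zero (Nat.le_zero.mp h)
    subst this; simp [pvBLoop, pvAMain]
  | succ n ih =>
    intro cs h jid acc map
    match cs with
    | [] => simp [pvBLoop, pvAMain]
    | c :: rest =>
      rw [pvAMain]
      simp only [pvBLoop]
      by_cases hc : c = '=' ∧ (rest.head? = some '{' ∨ rest.head? = some '[')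
      · simp only [if_pos hc]
        rw [pvBLoop_some]
        rw [ih _ (le_trans (pvAInner_snd_length rest 0 false false)
              (Nat.le_of_succ_le_succ h))]
        simp [List.append_assoc, pvPlaceholder_eq]
      · simp only [if_neg hc]
        rw [ih rest (Nat.le_of_succ_le_succ h)]
        simp [List.append_assoc]

-- ===== VERDICT (by name: the statement is the Claim_ definition above) =====
theorem mask_json_segments_py_spec : Claim_equal_mask_json_segments_py := by
  intro text _
  unfold Spec_mask_json_segments_py mask_json_segments_py mask_json_segments_py_alt
  rw [pvBLoop_none text.toList.length text.toList le_rfl]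
  simp
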